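-- pv_equiv track=rewrite | github.com/BUT-RT-Info/Referentiels | python/rpn/latex.py | contient_abbr
-- ===== SOURCE A (Python) =====
-- def contient_abbr(chaine, DATA_ABBREVIATIONS):
--     """Détecte les abréviations présentes dans la ``chaine`` et présentes dans le dictionnaire
--     ``DATA_ABBREVIATIONS`` et les renvoie sous forme d'une liste d'abréviations triée
--     par nombre de caractères décroissants"""
--     mots = []
--     for lettre in DATA_ABBREVIATIONS:
--         for mot in DATA_ABBREVIATIONS[lettre]:
--             if mot in chaine:
--                 mots.append(mot)
--     mots = sorted(
--         mots, key=lambda m: len(m), reverse=True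
--     )  # les mots triés par nbre de carac décroissant
--     return mots
-- ===== SOURCE B (Python) =====
-- def contient_abbr(chaine, DATA_ABBREVIATIONS):
--     """Détecte les abréviations présentes dans la ``chaine`` et présentes dans le dictionnaire
--     ``DATA_ABBREVIATIONS`` et les renvoie sous forme d'une liste d'abréviations triée
--     par nombre de caractères décroissants"""
--     candidats = [mot for mots in DATA_ABBREVIATIONS.values() for mot in mots]
--     longueurs = {len(mot) for mot in candidats}
--     # index every substring of chaine whose length is a candidate length
--     subs = set()
--     for i in range(len(chaine) + 1):
--         for L in longueurs:
--             if i + L <= len(chaine):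
--                 subs.add(chaine[i:i + L])
--     mots = [mot for mot in candidats if mot in subs]
--     mots.sort(key=len, reverse=True)
--     return mots
-- ===== Notes on version B (the rewrite author's own statement) =====
-- stated objective: faster
-- what changed: B inverts the search: instead of running one substring scan over the text per candidate word, it builds a set index of every substring of the text whose length is a candidate length, then tests each candidate by a single exact set lookup, and sorts the hits by length descending as A does.
import Mathlib
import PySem

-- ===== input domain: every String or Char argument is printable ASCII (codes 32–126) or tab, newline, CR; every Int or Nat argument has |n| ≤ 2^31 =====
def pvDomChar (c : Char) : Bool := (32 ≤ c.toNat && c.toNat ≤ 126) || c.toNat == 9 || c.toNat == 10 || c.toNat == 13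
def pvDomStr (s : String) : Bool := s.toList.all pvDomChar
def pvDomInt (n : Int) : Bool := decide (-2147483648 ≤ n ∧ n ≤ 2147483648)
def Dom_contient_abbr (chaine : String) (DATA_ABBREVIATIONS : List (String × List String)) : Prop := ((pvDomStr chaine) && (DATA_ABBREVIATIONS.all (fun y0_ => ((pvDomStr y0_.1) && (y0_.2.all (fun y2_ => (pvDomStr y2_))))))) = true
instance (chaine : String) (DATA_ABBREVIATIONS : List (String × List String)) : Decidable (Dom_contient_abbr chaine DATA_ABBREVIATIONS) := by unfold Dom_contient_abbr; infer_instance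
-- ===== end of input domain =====

-- ===== PORT A =====
-- B replaces A's per-pattern substring searches by one index built over the text: it inserts
-- every substring of `chaine` of a candidate length into a set and keeps the candidates found
-- in that set; neither program mutates its arguments.
def contient_abbr (chaine : String) (DATA_ABBREVIATIONS : List (String × List String)) : List String :=
  let d := PySem.Dict.ofList DATA_ABBREVIATIONS
  let mots := d.keys.foldl (fun mots lettre =>
      (d.getD lettre []).foldl (fun mots mot =>
        if PySem.Str.isIn mot chaine then mots ++ [mot] else mots) mots) []
  PySem.List.sorted mots (fun m => PySem.Str.len m) true

-- ===== PORT B =====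
def contient_abbr_alt (chaine : String) (DATA_ABBREVIATIONS : List (String × List String)) : List String :=
  let d := PySem.Dict.ofList DATA_ABBREVIATIONS
  let candidats := d.values.flatMap (fun mots => mots)
  let longueurs : PySem.Set Int := PySem.Set.ofList (candidats.map (fun mot => PySem.Str.len mot))
  let n := PySem.Str.len chaine
  let subs : PySem.Set String :=
    (PySem.List.pyRange 0 (n + 1)).foldl (fun subs i =>
      longueurs.foldl (fun subs L =>
        if i + L ≤ n then subs.add (PySem.Str.slice chaine (some i) (some (i + L))) else subs) subs)
      (PySem.Set.ofList [])
  let mots := candidats.filter (fun mot => subs.contains mot)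
  PySem.List.sorted mots (fun m => PySem.Str.len m) true

-- ===== PRECONDITION & SPEC =====
def Spec_contient_abbr (chaine : String) (DATA_ABBREVIATIONS : List (String × List String)) (out : List String) : Prop := out = contient_abbr_alt chaine DATA_ABBREVIATIONS
instance (chaine : String) (DATA_ABBREVIATIONS : List (String × List String)) (out : List String) : Decidable (Spec_contient_abbr chaine DATA_ABBREVIATIONS out) := by unfold Spec_contient_abbr; infer_instance

-- ===== CLAIM (what is proved, stated in full; the proofs are below) =====
def Claim_equal_contient_abbr : Prop := ∀ (chaine : String) (DATA_ABBREVIATIONS : List (String × List String)), Dom_contient_abbr chaine DATA_ABBREVIATIONS → Spec_contient_abbr chaine DATA_ABBREVIATIONS (contient_abbr chaine DATA_ABBREVIATIONS)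

-- ===== LEMMAS AND PROOFS =====

-- membership in the inner set-building loop (one text position, all candidate lengths)
lemma mem_inner_fold (n i : Int) (g : Int → Int → String) (ls : List Int) (s : PySem.Set String) (x : String) :
    (x ∈ ls.foldl (fun s L => if i + L ≤ n then s.add (g i L) else s) s) ↔
      x ∈ s ∨ ∃ L ∈ ls, i + L ≤ n ∧ x = g i L := by
  induction ls generalizing s with
  | nil => simp
  | cons L ls ih =>
    simp only [List.foldl_cons]
    by_cases h : i + L ≤ n
    · rw [if_pos h, ih]
      simp only [PySem.Set.mem_add, List.mem_cons]
      constructor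
      · rintro ((hx | rfl) | ⟨L', hL', hn', rfl⟩)
        · exact Or.inl hx
        · exact Or.inr ⟨L, Or.inl rfl, h, rfl⟩
        · exact Or.inr ⟨L', Or.inr hL', hn', rfl⟩
      · rintro (hx | ⟨L', rfl | hL', hn', rfl⟩)
        · exact Or.inl (Or.inl hx)
        · exact Or.inl (Or.inr rfl)
        · exact Or.inr ⟨L', hL', hn', rfl⟩
    · rw [if_neg h, ih]
      simp only [List.mem_cons]
      constructor
      · rintro (hx | ⟨L', hL', hn', rfl⟩)
        · exact Or.inl hx
        · exact Or.inr ⟨L', Or.inr hL', hn', rfl⟩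
      · rintro (hx | ⟨L', rfl | hL', hn', rfl⟩)
        · exact Or.inl hx
        · exact absurd hn' h
        · exact Or.inr ⟨L', hL', hn', rfl⟩

-- membership in the whole substring index
lemma mem_subs_fold (n : Int) (g : Int → Int → String) (ls : List Int) (idxs : List Int)
    (s : PySem.Set String) (x : String) :
    (x ∈ idxs.foldl (fun s i => ls.foldl (fun s L => if i + L ≤ n then s.add (g i L) else s) s) s) ↔
      x ∈ s ∨ ∃ i ∈ idxs, ∃ L ∈ ls, i + L ≤ n ∧ x = g i L := by
  induction idxs generalizing s with
  | nil => simp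
  | cons i idxs ih =>
    simp only [List.foldl_cons]
    rw [ih]
    simp only [List.mem_cons]
    constructor
    · rintro (hx | ⟨i', hi', hrest⟩)
      · rcases (mem_inner_fold n i g ls s x).mp hx with hx | ⟨L, hL, hn, rfl⟩
        · exact Or.inl hx
        · exact Or.inr ⟨i, Or.inl rfl, L, hL, hn, rfl⟩
      · exact Or.inr ⟨i', Or.inr hi', hrest⟩
    · rintro (hx | ⟨i', rfl | hi', hrest⟩)
      · exact Or.inl ((mem_inner_fold n i g ls s x).mpr (Or.inl hx))
      · exact Or.inl ((mem_inner_fold n i' g ls s x).mpr (Or.inr hrest))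
      · exact Or.inr ⟨i', hi', hrest⟩

-- a word whose length is indexed is in the substring index exactly when it occurs in `chaine`
lemma mem_subs_iff_isIn (chaine mot : String) (lens : List Int)
    (hmot : PySem.Str.len mot ∈ lens) (hpos : ∀ L ∈ lens, 0 ≤ L) :
    (mot ∈ (PySem.List.pyRange 0 (PySem.Str.len chaine + 1)).foldl (fun s i =>
        lens.foldl (fun s L =>
          if i + L ≤ PySem.Str.len chaine then s.add (PySem.Str.slice chaine (some i) (some (i + L))) else s) s)
      (PySem.Set.ofList [])) ↔ PySem.Str.isIn mot chaine = true := by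
  rw [mem_subs_fold]
  simp only [PySem.Set.mem_ofList, List.not_mem_nil, false_or]
  rw [PySem.Str.isIn_eq, ← PySem.Chars.exists_prefix_drop_iff_isIn]
  constructor
  · rintro ⟨i, hi, L, hL, hn, hx⟩
    rcases PySem.List.mem_pyRange_one.mp hi with ⟨h0i, _⟩
    have h0L : 0 ≤ L := hpos L hL
    refine ⟨i.toNat, ?_⟩
    have : mot.toList = List.take ((i + L).toNat - i.toNat) (List.drop i.toNat chaine.toList) := by
      rw [hx, PySem.Str.toList_slice, PySem.Chars.slice_eq_listSlice,
        PySem.List.slice_toNat chaine.toList h0i (by omega)]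
    rw [this]
    exact List.take_prefix _ _
  · rintro ⟨j, hj⟩
    have hn' : PySem.Str.len chaine = (chaine.toList.length : Int) := PySem.Str.len_eq chaine
    have hm' : PySem.Str.len mot = (mot.toList.length : Int) := PySem.Str.len_eq mot
    have hj' : mot.toList <+: List.drop (min j chaine.toList.length) chaine.toList := by
      rcases le_or_gt j chaine.toList.length with h | h
      · rwa [min_eq_left h]
      · have hdrop : List.drop j chaine.toList = [] := List.drop_eq_nil_of_le (by omega)
        have : mot.toList = [] := List.prefix_nil.mp (hdrop ▸ hj)
        rw [this]; exact List.nil_prefix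
    have hlen : mot.toList.length ≤ chaine.toList.length - min j chaine.toList.length := by
      have := hj'.length_le
      simpa using this
    refine ⟨(min j chaine.toList.length : Int), ?_, PySem.Str.len mot, hmot, ?_, ?_⟩
    · rw [PySem.List.mem_pyRange_one, hn']
      refine ⟨by positivity, ?_⟩
      omega
    · rw [hn', hm']
      omega
    · apply String.ext
      rw [PySem.Str.toList_slice, PySem.Chars.slice_eq_listSlice,
        PySem.List.slice_toNat chaine.toList (by positivity) (by rw [hm']; omega)]
      have htk : ((min j chaine.toList.length : Int) + PySem.Str.len mot).toNat
          - ((min j chaine.toList.length : Int)).toNat = mot.toList.length := by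
        rw [hm']; omega
      rw [htk]
      have hmin : (min (j : Int) (chaine.length : Int)).toNat = min j chaine.length := by
        omega
      have := List.prefix_iff_eq_take.mp hj'
      simpa [hmin] using this

-- A's nested accumulation loop is one filtered flatten of the dict's values
lemma mots_eq_filter_flat (chaine : String) (d : PySem.Dict String (List String)) :
    d.keys.foldl (fun mots lettre =>
        (d.getD lettre []).foldl (fun mots mot =>
          if PySem.Str.isIn mot chaine then mots ++ [mot] else mots) mots) [] =
      (d.keys.map (fun k => d.getD k [])).flatMap (fun ms =>
        ms.filter (fun mot => PySem.Str.isIn mot chaine)) := by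
  have hinner : ∀ (ms : List String) (acc : List String),
      ms.foldl (fun mots mot =>
        if PySem.Str.isIn mot chaine then mots ++ [mot] else mots) acc =
        acc ++ ms.filter (fun mot => PySem.Str.isIn mot chaine) := by
    intro ms acc
    have := PySem.List.foldl_append_if (fun mot => PySem.Str.isIn mot chaine)
      (fun mot => mot) ms acc
    simpa using this
  calc d.keys.foldl (fun mots lettre =>
        (d.getD lettre []).foldl (fun mots mot =>
          if PySem.Str.isIn mot chaine then mots ++ [mot] else mots) mots) []
      = d.keys.foldl (fun mots lettre =>
          mots ++ (d.getD lettre []).filter (fun mot => PySem.Str.isIn mot chaine)) [] := by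
        apply PySem.List.foldl_congr_mem
        intro acc lettre _
        exact hinner _ _
    _ = (d.keys.map (fun k => d.getD k [])).flatMap (fun ms =>
          ms.filter (fun mot => PySem.Str.isIn mot chaine)) := by
        rw [PySem.List.foldl_append_eq_flatMap
          (fun lettre => (d.getD lettre []).filter (fun mot => PySem.Str.isIn mot chaine)),
          List.nil_append, List.flatMap_map]

-- the two sorted arguments coincide: B's index lookup is A's substring test on every candidate
lemma main_eq (chaine : String) (D : List (String × List String)) :
    contient_abbr chaine D = contient_abbr_alt chaine D := by
  unfold contient_abbr contient_abbr_alt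
  simp only []
  set d := PySem.Dict.ofList D with hd
  set candidats := d.values.flatMap (fun mots => mots) with hcand
  set lens : List Int := PySem.Set.ofList (candidats.map (fun mot => PySem.Str.len mot)) with hlens
  have hposlens : ∀ L ∈ lens, 0 ≤ L := by
    intro L hL
    rw [hlens] at hL
    rcases List.mem_map.mp (PySem.Set.mem_ofList _ _ |>.mp hL) with ⟨m, _, rfl⟩
    rw [PySem.Str.len_eq]; positivity
  have hfilter : candidats.filter (fun mot =>
      PySem.Set.contains ((PySem.List.pyRange 0 (PySem.Str.len chaine + 1)).foldl (fun s i =>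
        lens.foldl (fun s L =>
          if i + L ≤ PySem.Str.len chaine then s.add (PySem.Str.slice chaine (some i) (some (i + L))) else s) s)
        (PySem.Set.ofList [])) mot) =
      candidats.filter (fun mot => PySem.Str.isIn mot chaine) := by
    apply List.filter_congr
    intro mot hmem
    have hmotlen : PySem.Str.len mot ∈ lens := by
      rw [hlens]
      exact (PySem.Set.mem_ofList _ _).mpr (List.mem_map.mpr ⟨mot, hmem, rfl⟩)
    have hiff := mem_subs_iff_isIn chaine mot lens hmotlen hposlens
    cases hIs : PySem.Str.isIn mot chaine with
    | true => exact (PySem.Set.contains_iff _ _).mpr (hiff.mpr hIs)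
    | false =>
      rw [Bool.eq_false_iff]
      intro hc
      have := hiff.mp ((PySem.Set.contains_iff _ _).mp hc)
      rw [hIs] at this
      exact Bool.false_ne_true this
  rw [hfilter, mots_eq_filter_flat chaine d, hcand,
    PySem.Dict.values_eq_map_keys d (hd ▸ PySem.Dict.nodup_keys_ofList D) [],
    List.filter_flatMap, List.flatMap_map]

-- ===== VERDICT (by name: the statement is the Claim_ definition above) =====
theorem contient_abbr_spec : Claim_equal_contient_abbr := by
  intro chaine DATA_ABBREVIATIONS _
  exact main_eq chaine DATA_ABBREVIATIONS
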